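-- pv_equiv track=rewrite | github.com/hjoo830/Algorithms | 프로그래머스/1/1845. 폰켓몬/폰켓몬.py | solution
-- ===== SOURCE A (Python) =====
-- def solution(nums):
--     N=len(nums)//2
--     dic={}
--     for num in nums:
--         dic[num]=0
--     for num in nums:
--         dic[num]+=1
--
--     return min(len(dic), N)
-- ===== SOURCE B (Python) =====
-- def solution(nums):
--     s = sorted(nums)
--     distinct = 0
--     for i in range(len(s)):
--         if i == 0 or s[i] != s[i - 1]:
--             distinct += 1
--     return min(distinct, len(nums) // 2)
-- ===== Notes on version B (the rewrite author's own statement) =====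
-- stated objective: alternative
-- what changed: Replaces A's two hash-table population loops with sort-then-adjacent-scan: sort nums, count positions where the value differs from its predecessor, return min(distinct, len//2).
import Mathlib
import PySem

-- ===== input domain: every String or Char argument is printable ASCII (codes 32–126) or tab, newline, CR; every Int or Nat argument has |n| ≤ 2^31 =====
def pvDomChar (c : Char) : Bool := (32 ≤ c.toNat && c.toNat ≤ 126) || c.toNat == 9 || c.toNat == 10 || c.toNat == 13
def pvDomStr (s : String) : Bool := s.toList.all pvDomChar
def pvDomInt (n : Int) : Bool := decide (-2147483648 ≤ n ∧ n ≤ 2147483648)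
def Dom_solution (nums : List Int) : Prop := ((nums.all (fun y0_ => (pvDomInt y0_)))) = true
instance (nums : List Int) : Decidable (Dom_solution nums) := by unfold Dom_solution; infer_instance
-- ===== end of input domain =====

-- B replaces A's two dict-population loops with sort + adjacent-difference scan (alternative algorithm, same results).

-- ===== PORT A =====
def solution (nums : List Int) : Int :=
  let N := PySem.Int.floordiv (nums.length : Int) 2
  let dic := nums.foldl (fun d num => d.insert num (0 : Int)) PySem.Dict.empty
  let dic2 := nums.foldl (fun d num => d.modify num 0 (· + 1)) dic
  min (dic2.size : Int) N

-- ===== PORT B =====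
-- the 'for x in s' loop of Source B, state = (distinct, prev)
def countLoop : Int → Option Int → List Int → Int
  | d, _, [] => d
  | d, prev, x :: t =>
      countLoop (if prev = none ∨ some x ≠ prev then d + 1 else d) (some x) t

def solution_alt (nums : List Int) : Int :=
  let s := PySem.List.sorted nums (fun x => x) false
  let distinct := countLoop 0 none s
  min distinct (PySem.Int.floordiv (nums.length : Int) 2)

-- ===== PRECONDITION & SPEC =====
def Spec_solution (nums : List Int) (out : Int) : Prop := out = solution_alt nums
instance (nums : List Int) (out : Int) : Decidable (Spec_solution nums out) := by unfold Spec_solution; infer_instance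

-- ===== CLAIM (what is proved, stated in full; the proofs are below) =====
def Claim_equal_solution : Prop := ∀ (nums : List Int), Dom_solution nums → Spec_solution nums (solution nums)

-- ===== LEMMAS AND PROOFS =====

-- Set.update adds nothing when every element is already present
theorem set_update_of_all_mem (s : PySem.Set Int) (xs : List Int)
    (h : ∀ x ∈ xs, x ∈ s) : PySem.Set.update s xs = s := by
  induction xs with
  | nil => rfl
  | cons x t ih =>
    have hx : PySem.Set.add s x = s := by
      simp [PySem.Set.add, PySem.Set.contains, h x (by simp)]
    simp only [PySem.Set.update, List.foldl_cons] at *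
    rw [hx]
    exact ih (fun y hy => h y (by simp [hy]))

theorem countLoop_shift (l : List Int) (prev : Option Int) (d : Int) :
    countLoop d prev l = d + countLoop 0 prev l := by
  induction l generalizing prev d with
  | nil => simp [countLoop]
  | cons x t ih =>
    simp only [countLoop]
    rw [ih (some x) (if prev = none ∨ some x ≠ prev then d + 1 else d),
      ih (some x) (if prev = none ∨ some x ≠ prev then 0 + 1 else 0)]
    split_ifs <;> ring

theorem card_insert_erase (y : Int) (s : Finset Int) :
    (insert y s).card = (s.erase y).card + 1 := by
  by_cases hy : y ∈ s
  · rw [Finset.card_insert_of_mem hy, Finset.card_erase_add_one hy]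
  · rw [Finset.card_insert_of_notMem hy, Finset.erase_eq_of_notMem hy]

theorem countLoop_some (l : List Int) (p : Int)
    (hs : l.Pairwise (· ≤ ·)) (hlo : ∀ y ∈ l, p ≤ y) :
    countLoop 0 (some p) l = ((l.toFinset.erase p).card : Int) := by
  induction l generalizing p with
  | nil => simp [countLoop]
  | cons y t ih =>
    have hst : t.Pairwise (· ≤ ·) := hs.tail
    have hyt : ∀ z ∈ t, y ≤ z := fun z hz => (List.pairwise_cons.mp hs).1 z hz
    by_cases hyp : y = p
    · subst hyp
      simp only [countLoop]
      rw [if_neg (by simp), ih y hst hyt]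
      congr 2
      rw [List.toFinset_cons, Finset.erase_insert_eq_erase]
    · simp only [countLoop]
      rw [if_pos (by simp [hyp]), countLoop_shift, ih y hst hyt]
      have hplt : p < y := lt_of_le_of_ne (hlo y (by simp)) (Ne.symm hyp)
      have hpnot : p ∉ t.toFinset := by
        simp only [List.mem_toFinset]
        intro hpt
        exact absurd (hyt p hpt) (not_le.mpr hplt)
      have h1 : (y :: t).toFinset.erase p = insert y t.toFinset := by
        rw [List.toFinset_cons]
        refine Finset.erase_eq_of_notMem ?_
        simp only [Finset.mem_insert, not_or]
        exact ⟨fun h => hyp h.symm, hpnot⟩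
      rw [h1, card_insert_erase]
      push_cast
      ring

theorem countLoop_none (l : List Int) (hs : l.Pairwise (· ≤ ·)) :
    countLoop 0 none l = (l.toFinset.card : Int) := by
  cases l with
  | cons x t =>
    simp only [countLoop]
    rw [if_pos (by simp), countLoop_shift, countLoop_some t x hs.tail
      (fun z hz => (List.pairwise_cons.mp hs).1 z hz),
      List.toFinset_cons, card_insert_erase]
    push_cast
    ring
  | nil => simp [countLoop]

theorem dedup_length_eq_card (nums : List Int) :
    (PySem.List.dedup nums).length = nums.toFinset.card := by
  have hfs : (PySem.List.dedup nums).toFinset = nums.toFinset := by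
    ext x; simp only [List.mem_toFinset]; exact PySem.List.mem_dedup nums x
  rw [← hfs, List.toFinset_card_of_nodup (PySem.List.nodup_dedup nums)]

-- ===== VERDICT (by name: the statement is the Claim_ definition above) =====
theorem solution_spec : Claim_equal_solution := by
  intro nums _
  unfold Spec_solution solution solution_alt
  have hk1 : (nums.foldl (fun d num => d.insert num (0 : Int)) PySem.Dict.empty).keys
      = PySem.List.dedup nums := by
    rw [PySem.Dict.keys_foldl_insert]
    simp [PySem.Dict.keys_empty, PySem.Set.update, PySem.Set.ofList_eq_foldl,
      PySem.List.dedup_eq_ofList]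
  have hsize : (nums.foldl (fun d num => d.modify num 0 (· + 1))
      (nums.foldl (fun d num => d.insert num (0 : Int)) PySem.Dict.empty)).size
      = (PySem.List.dedup nums).length := by
    have hkeys : (nums.foldl (fun d num => d.modify num 0 (· + 1))
        (nums.foldl (fun d num => d.insert num (0 : Int)) PySem.Dict.empty)).keys
        = PySem.List.dedup nums := by
      rw [PySem.Dict.keys_foldl_modify, hk1]
      exact set_update_of_all_mem _ _ (fun x hx => (PySem.List.mem_dedup _ x).mpr hx)
    have hsz : ∀ (d : PySem.Dict Int Int), d.size = d.keys.length := by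
      intro d; simp [PySem.Dict.size, PySem.Dict.keys]
    rw [hsz, hkeys]
  have hsorted := PySem.List.sorted_pairwise (xs := nums) (key := fun x : Int => x)
  simp only [hsize, countLoop_none _ hsorted,
    List.toFinset_eq_of_perm _ _ (PySem.List.sorted_perm nums (fun x : Int => x) false),
    dedup_length_eq_card]
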